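-- pv_equiv track=rewrite | github.com/carlos-h-Al/AgenticApheresis | utils.py | red_squares_variance
-- ===== SOURCE A (Python) =====
-- def red_squares_variance(red_squares: list) -> list:
--     variance = 0
--     running_logic = False
--     # If first revised feedback is green, count how many green cycles there were before it
--     if red_squares[-1] == 0:
--         # Loops through an inverted list of feedbacks
--         for val in red_squares[::-1]:
--             if val == 0:
--                 variance += 1
--             # If the value of the feedback is 1 (1 = low draw) end the count
--             else: break
--         return variance
--     else:
--         for idx, val in enumerate(red_squares[::-1]):
--             if not running_logic:
--                 pass
--             else:
--                 if val == 0: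
--                     variance += 1
--                 else:
--                     break
--             # If the value checked is not the last one in the list, check if the value is 0 (0 = regular draw)
--             if idx != (len(red_squares) - 1):
--                 if val == 1 and red_squares[::-1][idx+1] == 0:
--                     running_logic = True
--             else:
--                 pass
--         return variance
-- ===== SOURCE B (Python) =====
-- def red_squares_variance(red_squares: list) -> int:
--     rev = red_squares[::-1]
--     if rev[0] == 0:
--         return _leading_zeros(rev)
--     # scan the reversed list once for the first adjacent (1, 0) pair,
--     # then count the zeros starting at the 0 of that pair
--     for j in range(len(rev) - 1):
--         if rev[j] == 1 and rev[j + 1] == 0: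
--             return _leading_zeros(rev[j + 1:])
--     return 0
--
--
-- def _leading_zeros(xs):
--     c = 0
--     for v in xs:
--         if v != 0:
--             break
--         c += 1
--     return c
-- ===== Notes on version B (the rewrite author's own statement) =====
-- stated objective: faster
-- what changed: A's single flag-driven loop that re-slices red_squares[::-1] inside the loop body is replaced by one upfront reversal plus two plain index scans (find the first adjacent (1,0) pair in the reversed list, then count the zero run), linear overall.
import Mathlib
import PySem

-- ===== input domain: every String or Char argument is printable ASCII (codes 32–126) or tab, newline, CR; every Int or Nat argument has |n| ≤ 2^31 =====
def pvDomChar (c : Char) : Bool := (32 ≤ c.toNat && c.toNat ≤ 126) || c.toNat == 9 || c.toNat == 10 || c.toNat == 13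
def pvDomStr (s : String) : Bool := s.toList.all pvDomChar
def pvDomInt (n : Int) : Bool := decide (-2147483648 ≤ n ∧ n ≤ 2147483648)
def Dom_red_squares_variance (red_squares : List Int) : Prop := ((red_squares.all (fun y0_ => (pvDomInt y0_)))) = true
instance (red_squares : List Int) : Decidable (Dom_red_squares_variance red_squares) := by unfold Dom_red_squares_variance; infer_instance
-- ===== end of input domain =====

-- B replaces A's flag-driven loop (which re-slices red_squares[::-1] inside the loop) by one
-- reversal plus index scans; objective: faster (no per-iteration re-reversal).

-- ===== PORT A =====
-- first branch: count leading zeros of the reversed list, break at first nonzero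
def pvALoop1 : List Int → Int → Int
  | [], v => v
  | x :: rest, v => if x == 0 then pvALoop1 rest (v + 1) else v

-- trigger update: `if idx != len-1: if val == 1 and red_squares[::-1][idx+1] == 0: running_logic = True`
-- (the re-reversal `red_squares[::-1]` is `List.reverse`, cf. PySem.List.slice?_none_none_neg_one)
def pvATrig (red_squares : List Int) (idx val : Int) (rl : Bool) : Bool :=
  rl || (decide (idx ≠ (red_squares.length : Int) - 1) &&
         (val == 1 && (PySem.List.pyGet? red_squares.reverse (idx + 1) == some 0)))

-- second branch: `for idx, val in enumerate(red_squares[::-1]): …` with state (variance, running_logic)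
def pvALoop2 (red_squares : List Int) : List (Int × Int) → Int → Bool → Int
  | [], v, _ => v
  | (idx, val) :: rest, v, rl =>
    if rl then
      if val == 0 then pvALoop2 red_squares rest (v + 1) (pvATrig red_squares idx val rl)
      else v
    else pvALoop2 red_squares rest v (pvATrig red_squares idx val rl)

def red_squares_variance (red_squares : List Int) : Int :=
  match PySem.List.pyGet? red_squares (-1) with
  | none => 0  -- indexing the last element raises IndexError on the empty list; excluded by Pre_
  | some last =>
    if last == 0 then pvALoop1 red_squares.reverse 0
    else pvALoop2 red_squares (PySem.List.enumerate red_squares.reverse 0) 0 false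

-- ===== PORT B =====
-- `_count_zeros_from(xs, i)`: count zeros from index i until a nonzero (index is a Nat:
-- the Python index starts at 0 or j+1 and only increments, so it is always ≥ 0)
def pvCountZerosFrom (xs : List Int) (i : Nat) (c : Int) : Int :=
  if h : i < xs.length then
    if xs[i] == 0 then pvCountZerosFrom xs (i + 1) (c + 1) else c
  else c
termination_by xs.length - i

-- the `while j + 1 < len(rev)` scan for the first adjacent (1, 0) pair
def pvScanPair (rev : List Int) (j : Nat) : Int :=
  if h : j + 1 < rev.length then
    if rev[j] == 1 && rev[j + 1]'h == 0 then pvCountZerosFrom rev (j + 1) 0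
    else pvScanPair rev (j + 1)
  else 0
termination_by rev.length - j

def red_squares_variance_alt (red_squares : List Int) : Int :=
  let rev := red_squares.reverse
  match PySem.List.pyGet? rev 0 with
  | none => 0  -- indexing the first element raises IndexError on the empty list; excluded by Pre_
  | some r0 => if r0 == 0 then pvCountZerosFrom rev 0 0 else pvScanPair rev 0

-- ===== PRECONDITION & SPEC =====
-- A indexes the last element of red_squares, which raises IndexError on the empty list
def Pre_red_squares_variance (red_squares : List Int) : Prop := red_squares ≠ []
instance (red_squares : List Int) : Decidable (Pre_red_squares_variance red_squares) := by unfold Pre_red_squares_variance; infer_instance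
def pvWitness_red_squares_variance : List Int := [1, 0]

def Spec_red_squares_variance (red_squares : List Int) (out : Int) : Prop := out = red_squares_variance_alt red_squares
instance (red_squares : List Int) (out : Int) : Decidable (Spec_red_squares_variance red_squares out) := by unfold Spec_red_squares_variance; infer_instance

-- ===== CLAIM (what is proved, stated in full; the proofs are below) =====
def Claim_equal_red_squares_variance : Prop := ∀ (red_squares : List Int), Dom_red_squares_variance red_squares → Pre_red_squares_variance red_squares → Spec_red_squares_variance red_squares (red_squares_variance red_squares)

-- ===== LEMMAS AND PROOFS =====

-- specification helpers: leading-zero count, and zeros after the first adjacent (1,0) pair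
def pvZ : List Int → Int
  | [] => 0
  | x :: t => if x = 0 then 1 + pvZ t else 0

def pvF : List Int → Int
  | a :: b :: t => if a = 1 ∧ b = 0 then 1 + pvZ t else pvF (b :: t)
  | _ => 0

theorem pvALoop1_eq (xs : List Int) : ∀ v, pvALoop1 xs v = v + pvZ xs := by
  induction xs with
  | nil => intro v; simp [pvALoop1, pvZ]
  | cons x t ih =>
    intro v
    by_cases hx : x = 0
    · simp [pvALoop1, pvZ, hx, ih]; ring
    · simp [pvALoop1, pvZ, hx]

theorem pvCountZerosFrom_eq (xs : List Int) : ∀ i c, pvCountZerosFrom xs i c = c + pvZ (xs.drop i) := by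
  intro i
  induction hn : xs.length - i using Nat.strong_induction_on generalizing i with
  | _ n ih =>
    intro c
    unfold pvCountZerosFrom
    by_cases h : i < xs.length
    · rw [List.drop_eq_getElem_cons h]
      by_cases hx : xs[i] = 0
      · simp only [h, dif_pos, hx, beq_self_eq_true, if_pos]
        rw [ih (xs.length - (i+1)) (by omega) (i+1) rfl]
        simp [pvZ]; ring
      · simp [h, hx, pvZ]
    · have hd : xs.drop i = [] := List.drop_eq_nil_of_le (by omega)
      simp [h, hd, pvZ]

theorem pvScanPair_eq (rev : List Int) : ∀ j, pvScanPair rev j = pvF (rev.drop j) := by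
  intro j
  induction hn : rev.length - j using Nat.strong_induction_on generalizing j with
  | _ n ih =>
    unfold pvScanPair
    by_cases h : j + 1 < rev.length
    · have hj : j < rev.length := by omega
      rw [List.drop_eq_getElem_cons hj, List.drop_eq_getElem_cons h]
      by_cases hp : rev[j] = 1 ∧ rev[j + 1] = 0
      · simp only [h, dif_pos, hp.1, hp.2, beq_self_eq_true, Bool.and_self, if_pos]
        rw [pvCountZerosFrom_eq, List.drop_eq_getElem_cons h]
        simp [pvF, pvZ, hp.2]
      · have hb : (rev[j] == 1 && rev[j + 1] == 0) = false := by
          rcases not_and_or.mp hp with h1 | h2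
          · simp [h1]
          · simp [h2]
        simp only [h, dif_pos, hb, Bool.false_eq_true, if_neg, not_false_iff]
        rw [ih (rev.length - (j+1)) (by omega) (j+1) rfl, List.drop_eq_getElem_cons h]
        simp only [pvF]
        split
        · exact absurd (by assumption) hp
        · rfl
    · by_cases hj : j < rev.length
      · have hd : rev.drop (j + 1) = [] := List.drop_eq_nil_of_le (by omega)
        have : rev.drop j = [rev[j]] := by rw [List.drop_eq_getElem_cons hj, hd]
        simp [h, this, pvF]
      · have hd : rev.drop j = [] := List.drop_eq_nil_of_le (by omega)
        simp [h, hd, pvF]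

-- counting phase: once running_logic is true it stays true and the trigger is irrelevant
theorem pvALoop2_true (rs : List Int) (xs : List Int) : ∀ (s : Int) v, pvALoop2 rs (PySem.List.enumerate xs s) v true = v + pvZ xs := by
  induction xs with
  | nil => intro s v; simp [PySem.List.enumerate_nil, pvALoop2, pvZ]
  | cons x t ih =>
    intro s v
    rw [PySem.List.enumerate_cons]
    by_cases hx : x = 0
    · subst hx
      have ht : pvATrig rs s (0 : Int) true = true := by simp [pvATrig]
      simp only [pvALoop2, ht, beq_self_eq_true, if_true]
      rw [ih]
      simp [pvZ]; ring
    · simp [pvALoop2, hx, pvZ]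

-- search phase: A's trigger scan computes pvF of the remaining suffix
theorem pvALoop2_false (rs : List Int) : ∀ (i : Nat), i ≤ rs.reverse.length →
    ∀ v, pvALoop2 rs (PySem.List.enumerate (rs.reverse.drop i) (i : Int)) v false = v + pvF (rs.reverse.drop i) := by
  intro i
  induction hn : rs.reverse.length - i using Nat.strong_induction_on generalizing i with
  | _ n ih =>
    intro hi v
    by_cases h : i < rs.reverse.length
    · rw [List.drop_eq_getElem_cons h, PySem.List.enumerate_cons]
      by_cases h1 : i + 1 < rs.reverse.length
      · -- the trigger reads red_squares[::-1][idx+1] = rs.reverse[i+1]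
        have hget : PySem.List.pyGet? rs.reverse ((i : Int) + 1) = some (rs.reverse[i + 1]'h1) := by
          have : ((i : Int) + 1) = ((i + 1 : Nat) : Int) := by push_cast; ring
          rw [this, PySem.List.pyGet?_natCast]
          simp [List.getElem?_eq_getElem h1]
        by_cases hp : rs.reverse[i] = 1 ∧ rs.reverse[i + 1]'h1 = 0
        · have hne : (i : Int) ≠ (rs.length : Int) - 1 := by
            have hl : rs.reverse.length = rs.length := List.length_reverse
            omega
          have htrig : pvATrig rs (i : Int) (rs.reverse[i]) false = true := by
            simp [pvATrig, hget, hp.1, hp.2, hne]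
          simp only [pvALoop2, htrig, Bool.false_eq_true, if_neg, not_false_iff]
          have : ((i : Int) + 1) = ((i + 1 : Nat) : Int) := by push_cast; ring
          rw [this, pvALoop2_true]
          rw [List.drop_eq_getElem_cons h1, hp.1, hp.2]
          simp [pvF, pvZ]
        · have hbf : (rs.reverse[i] == 1 && (PySem.List.pyGet? rs.reverse ((i : Int) + 1) == some 0)) = false := by
            rw [hget]
            rcases not_and_or.mp hp with h1' | h2'
            · rw [beq_eq_false_iff_ne.mpr h1', Bool.false_and]
            · simp only [Option.some_beq_some]
              rw [beq_eq_false_iff_ne.mpr h2', Bool.and_false]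
          have htrig : pvATrig rs (i : Int) (rs.reverse[i]) false = false := by
            simp only [pvATrig, hbf, Bool.and_false, Bool.false_or]
          simp only [pvALoop2, htrig, Bool.false_eq_true, if_neg, not_false_iff]
          have hcast : ((i : Int) + 1) = ((i + 1 : Nat) : Int) := by push_cast; ring
          rw [hcast, ih (rs.reverse.length - (i + 1)) (by omega) (i + 1) rfl (by omega) v]
          rw [List.drop_eq_getElem_cons h1]
          simp only [pvF]
          split
          · exact absurd (by assumption) hp
          · rfl
      · -- idx == len - 1: the trigger is skipped and the loop ends
        have htail : rs.reverse.drop (i + 1) = [] := List.drop_eq_nil_of_le (by omega)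
        have hne : ¬ ((i : Int) ≠ (rs.length : Int) - 1) := by
          have hl : rs.reverse.length = rs.length := List.length_reverse
          omega
        have htrig : pvATrig rs (i : Int) (rs.reverse[i]) false = false := by
          simp [pvATrig, hne]
        simp [htail, pvALoop2, PySem.List.enumerate_nil, pvF]
    · have : rs.reverse.drop i = [] := List.drop_eq_nil_of_le (by omega)
      simp [this, PySem.List.enumerate_nil, pvALoop2, pvF]

-- ===== VERDICT (by name: the statement is the Claim_ definition above) =====
theorem red_squares_variance_spec : Claim_equal_red_squares_variance := by
  intro rs _ hpre
  unfold Spec_red_squares_variance red_squares_variance red_squares_variance_alt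
  have hne : rs.reverse ≠ [] := by simpa using hpre
  obtain ⟨r0, t, hrev⟩ := List.exists_cons_of_ne_nil hne
  have hhead' : rs.reverse.head? = some r0 := by rw [hrev]; rfl
  have hhead : PySem.List.pyGet? rs.reverse 0 = some r0 := by
    rw [show (0 : Int) = ((0 : Nat) : Int) from rfl, PySem.List.pyGet?_natCast, hrev]; rfl
  rw [PySem.List.pyGet?_neg_one, ← List.head?_reverse, hhead']
  show _ = (match PySem.List.pyGet? rs.reverse 0 with
    | none => 0
    | some r0 => if (r0 == 0) = true then pvCountZerosFrom rs.reverse 0 0 else pvScanPair rs.reverse 0)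
  rw [hhead]
  show (if (r0 == 0) = true then pvALoop1 rs.reverse 0 else pvALoop2 rs (PySem.List.enumerate rs.reverse) 0 false)
      = (if (r0 == 0) = true then pvCountZerosFrom rs.reverse 0 0 else pvScanPair rs.reverse 0)
  by_cases h0 : r0 = 0
  · simp only [h0, beq_self_eq_true, if_true]
    rw [pvALoop1_eq, pvCountZerosFrom_eq]
    simp
  · have hb : (r0 == 0) = false := beq_eq_false_iff_ne.mpr h0
    simp only [hb, Bool.false_eq_true, if_neg, not_false_iff]
    rw [pvScanPair_eq]
    have := pvALoop2_false rs 0 (by omega) 0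
    simpa using this
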